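-- pv_equiv track=rewrite | github.com/NA-Dev/nlp-wine-recommender | grape_id.py | chooseMostCommon
-- ===== SOURCE A (Python) =====
-- from collections import Counter
--
-- def chooseMostCommon(searchList, breakTies = False):
--     searchSet = set(searchList)
--     if len(searchSet) == 1:
--         return (searchList[0], searchList)
--     elif len(searchSet) == 0:
--         return (None, searchList)
--     else:
--         sorted = Counter(searchList).most_common() # list of tuples with (value, count) in sorted order
--         mostCommon = [(value, count) for (value, count) in sorted if sorted[0][1] == count]
--         if len(mostCommon) == 1 | breakTies:
--             return (mostCommon[0][0], searchList)
--         else: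
--             return (None, searchList)
-- ===== SOURCE B (Python) =====
-- def chooseMostCommon(searchList, breakTies=False):
--     if not searchList:
--         return (None, searchList)
--     counts = {}
--     for x in searchList:
--         counts[x] = counts.get(x, 0) + 1
--     maxCount, best, unique = 0, None, False
--     for k, c in counts.items():
--         if maxCount < c:
--             maxCount, best, unique = c, k, True
--         elif c == maxCount:
--             unique = False
--     return (best if unique else None, searchList)
-- ===== Notes on version B (the rewrite author's own statement) =====
-- stated objective: alternative
-- what changed: B replaces A's set() pre-check plus Counter().most_common() full sort and filtering comprehension by one frequency-dict pass followed by a single running-max scan that tracks the current maximum count, its first key and a uniqueness flag (the inert '1 | breakTies' test, which always equals 1, is realised as the uniqueness flag).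
import Mathlib
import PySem

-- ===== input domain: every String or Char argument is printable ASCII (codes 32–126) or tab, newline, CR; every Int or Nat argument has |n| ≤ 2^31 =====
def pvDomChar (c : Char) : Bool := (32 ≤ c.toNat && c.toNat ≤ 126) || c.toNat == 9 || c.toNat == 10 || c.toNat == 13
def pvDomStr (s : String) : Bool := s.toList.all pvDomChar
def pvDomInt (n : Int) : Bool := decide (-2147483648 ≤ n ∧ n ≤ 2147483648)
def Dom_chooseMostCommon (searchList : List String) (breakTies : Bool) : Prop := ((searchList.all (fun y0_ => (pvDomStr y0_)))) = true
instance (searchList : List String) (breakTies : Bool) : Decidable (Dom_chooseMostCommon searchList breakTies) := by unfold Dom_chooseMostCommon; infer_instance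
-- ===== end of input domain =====

set_option maxRecDepth 8192


-- B replaces A's set() pre-check + Counter + full sort of the counts + filtering comprehension
-- by a single running-max scan over a frequency dict built in one pass (no sort); objective: alternative.

-- ===== PORT A =====
def chooseMostCommon (searchList : List String) (breakTies : Bool) : Option String × List String :=
  let searchSet := PySem.Set.ofList searchList
  if searchSet.length == 1 then
    (PySem.List.pyGet? searchList 0, searchList)
  else if searchSet.length == 0 then
    (none, searchList)
  else
    -- Counter(searchList).most_common() = sorted(items, key = count, reverse = True)
    let sortedL := PySem.List.sorted (PySem.Dict.counter searchList).items (fun vc => vc.2) true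
    let mostCommon := sortedL.filter (fun vc => (PySem.List.pyGet? sortedL 0).map (·.2) == some vc.2)
    if (mostCommon.length : Int) == PySem.Int.bor 1 (if breakTies then 1 else 0) then
      ((PySem.List.pyGet? mostCommon 0).map (·.1), searchList)
    else
      (none, searchList)

-- ===== PORT B =====
-- the body of B's second loop ('if maxCount < c: … elif c == maxCount: …'), as a named step
def pvStep (s : Int × Option String × Bool) (kc : String × Int) : Int × Option String × Bool :=
  if s.1 < kc.2 then (kc.2, some kc.1, true)
  else if kc.2 == s.1 then (s.1, s.2.1, false)
  else s

def chooseMostCommon_alt (searchList : List String) (breakTies : Bool) : Option String × List String :=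
  if searchList = [] then (none, searchList)
  else
    let counts := searchList.foldl (fun d x => d.insert x (d.getD x 0 + 1)) PySem.Dict.empty
    let r := counts.items.foldl pvStep ((0 : Int), none, false)
    ((if r.2.2 then r.2.1 else none), searchList)

-- ===== PRECONDITION & SPEC =====
def Spec_chooseMostCommon (searchList : List String) (breakTies : Bool) (out : Option String × List String) : Prop := out = chooseMostCommon_alt searchList breakTies
instance (searchList : List String) (breakTies : Bool) (out : Option String × List String) : Decidable (Spec_chooseMostCommon searchList breakTies out) := by unfold Spec_chooseMostCommon; infer_instance

-- ===== CLAIM (what is proved, stated in full; the proofs are below) =====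
def Claim_equal_chooseMostCommon : Prop := ∀ (searchList : List String) (breakTies : Bool), Dom_chooseMostCommon searchList breakTies → Spec_chooseMostCommon searchList breakTies (chooseMostCommon searchList breakTies)

-- ===== LEMMAS AND PROOFS =====

-- set(xs) of a nonempty list starts with the list's first element
theorem pvFoldlAdd_suffix {α : Type} [BEq α] (t : List α) : ∀ (s : PySem.Set α),
    ∃ r, t.foldl PySem.Set.add s = s ++ r := by
  induction t with
  | nil => intro s; exact ⟨[], by simp⟩
  | cons x t ih =>
    intro s
    simp only [List.foldl_cons]
    obtain ⟨r, hr⟩ := ih (PySem.Set.add s x)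
    by_cases h : PySem.Set.contains s x = true
    · refine ⟨r, ?_⟩
      rw [hr]; simp only [PySem.Set.add]; rw [if_pos h]
    · refine ⟨x :: r, ?_⟩
      rw [hr]; simp only [PySem.Set.add]; rw [if_neg h]; simp

theorem pvOfList_cons (a : String) (t : List String) :
    ∃ r, PySem.Set.ofList (a :: t) = a :: r := by
  have h0 : PySem.Set.ofList (a :: t) = t.foldl PySem.Set.add (PySem.Set.add PySem.Set.empty a) := rfl
  have h1 : PySem.Set.add PySem.Set.empty a = [a] := rfl
  obtain ⟨r, hr⟩ := pvFoldlAdd_suffix t [a]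
  exact ⟨r, by rw [h0, h1, hr]; rfl⟩

-- B's single scan, characterised: writing M for the running max over the whole list,
-- if some element exceeds the initial max m then the final state is
-- (M, some k, [number of M-elements = 1]) with (k, M) the first M-element of the list;
-- if none exceeds m, max and candidate are untouched and uniqueness becomes
-- 'u and no element ties with m'.
theorem pvStep_char (l : List (String × Int)) : ∀ (m : Int) (b : Option String) (u : Bool),
    (((∃ e ∈ l, m < e.2) →
        ∃ k rest, l.filter (fun e => e.2 == l.foldl (fun a e => max a e.2) m) = (k, l.foldl (fun a e => max a e.2) m) :: rest ∧
          l.foldl pvStep (m, b, u) =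
            (l.foldl (fun a e => max a e.2) m, some k,
             decide (l.countP (fun e => e.2 == l.foldl (fun a e => max a e.2) m) = 1))) ∧
     ((∀ e ∈ l, e.2 ≤ m) →
        l.foldl pvStep (m, b, u) = (m, b, u && decide (l.countP (fun e => e.2 == m) = 0)))) := by
  induction l with
  | nil => intro m b u; simp
  | cons e t ih =>
    intro m b u
    constructor
    · rintro ⟨x, hx, hmx⟩
      by_cases h1 : m < e.2
      · simp only [List.foldl_cons, pvStep, if_pos h1, List.filter_cons, List.countP_cons,
          max_eq_right (le_of_lt h1)]
        by_cases h2 : ∃ y ∈ t, e.2 < y.2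
        · obtain ⟨k, rest, hf, hr⟩ := (ih e.2 (some e.1) true).1 h2
          obtain ⟨y, hy, hey⟩ := h2
          have hMe : e.2 < t.foldl (fun a e => max a e.2) e.2 := by
            have := (PySem.List.le_foldl_max_int t (fun e => e.2) e.2).2 y hy
            omega
          have hne : (e.2 == t.foldl (fun a e => max a e.2) e.2) = false := by
            simp; omega
          refine ⟨k, rest, ?_, ?_⟩
          · simp only [hne, Bool.false_eq_true, if_false]; exact hf
          · simp only [hne, Bool.false_eq_true, if_false, Nat.add_zero]; exact hr
        · have h2' : ∀ y ∈ t, y.2 ≤ e.2 := fun y hy => by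
            by_contra hgt
            exact h2 ⟨y, hy, by omega⟩
          have hr := (ih e.2 (some e.1) true).2 h2'
          have h3 : t.foldl (fun a x => max a x.2) e.2 = e.2 := by
            have hle := (PySem.List.le_foldl_max_int t (fun e => e.2) e.2).1
            have : t.foldl (fun a x => max a x.2) e.2 = (t.map (fun x => x.2)).foldl max e.2 := by
              rw [List.foldl_map]
            rcases PySem.List.foldl_max_mem (t.map (fun x => x.2)) e.2 with h | h
            · omega
            · obtain ⟨y, hy, hey⟩ := List.mem_map.1 h
              have := h2' y hy
              omega
          rw [h3]
          refine ⟨e.1, t.filter (fun y => y.2 == e.2), ?_, ?_⟩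
          · simp
          · rw [hr]
            have : (true && decide (t.countP (fun y => y.2 == e.2) = 0)) =
                decide ((t.countP (fun y => y.2 == e.2) + if (e.2 == e.2) = true then 1 else 0) = 1) := by
              simp
            rw [this]
      · have he : e.2 ≤ m := not_lt.1 h1
        have hx' : x ∈ t := by
          rcases List.mem_cons.1 hx with h | h
          · subst h; omega
          · exact h
        have h2 : ∃ y ∈ t, m < y.2 := ⟨x, hx', hmx⟩
        have hM : m < t.foldl (fun a e => max a e.2) m := by
          have := (PySem.List.le_foldl_max_int t (fun e => e.2) m).2 x hx'
          omega
        have hne : (e.2 == t.foldl (fun a e => max a e.2) m) = false := by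
          simp; omega
        by_cases heq : (e.2 == m) = true
        · simp only [List.foldl_cons, pvStep, if_neg h1, heq, if_true, List.filter_cons,
            List.countP_cons, max_eq_left he]
          obtain ⟨k, rest, hf, hr⟩ := (ih m b false).1 h2
          exact ⟨k, rest, by simp only [hne, Bool.false_eq_true, if_false]; exact hf,
            by simp only [hne, Bool.false_eq_true, if_false, Nat.add_zero]; exact hr⟩
        · rw [Bool.not_eq_true] at heq
          simp only [List.foldl_cons, pvStep, if_neg h1, heq, Bool.false_eq_true, if_false,
            List.filter_cons, List.countP_cons, max_eq_left he]
          obtain ⟨k, rest, hf, hr⟩ := (ih m b u).1 h2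
          exact ⟨k, rest, by simp only [hne, Bool.false_eq_true, if_false]; exact hf,
            by simp only [hne, Bool.false_eq_true, if_false, Nat.add_zero]; exact hr⟩
    · intro hle
      have he : e.2 ≤ m := hle e (by simp)
      have ht : ∀ y ∈ t, y.2 ≤ m := fun y hy => hle y (by simp [hy])
      by_cases heq : (e.2 == m) = true
      · have h1 : ¬ m < e.2 := not_lt.2 he
        simp only [List.foldl_cons, pvStep, if_neg h1, heq, if_true, List.countP_cons]
        rw [(ih m b false).2 ht]
        simp
      · have h1 : ¬ m < e.2 := not_lt.2 he
        rw [Bool.not_eq_true] at heq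
        simp only [List.foldl_cons, pvStep, if_neg h1, heq, Bool.false_eq_true, if_false,
          List.countP_cons, Nat.add_zero]
        rw [(ih m b u).2 ht]

theorem chooseMostCommon_spec : Claim_equal_chooseMostCommon := by
  intro searchList breakTies _
  unfold Spec_chooseMostCommon
  cases searchList with
  | nil => rfl
  | cons a t =>
    obtain ⟨r, hS⟩ := pvOfList_cons a t
    -- the counter items, shared by both sides
    have hitems : (PySem.Dict.counter (a :: t)).items
        = (PySem.Set.ofList (a :: t)).map (fun k => (k, (List.count k (a :: t) : Int))) :=
      PySem.Dict.items_counter _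
    have hex : ∃ e ∈ (PySem.Dict.counter (a :: t)).items, (0 : Int) < e.2 := by
      refine ⟨(a, (List.count a (a :: t) : Int)), ?_, ?_⟩
      · rw [hitems]
        exact List.mem_map.2 ⟨a, (PySem.Set.mem_ofList _ _).2 (by simp), rfl⟩
      · have : a ∈ (a :: t) := by simp
        have := List.count_pos_iff.2 this
        simp only []
        exact_mod_cast this
    obtain ⟨k, rest, hfilt, hfold⟩ := (pvStep_char (PySem.Dict.counter (a :: t)).items 0 none false).1 hex
    -- abbreviations
    set items := (PySem.Dict.counter (a :: t)).items with hitems_def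
    set M := items.foldl (fun acc e => max acc e.2) 0 with hM_def
    set c := items.countP (fun e => e.2 == M) with hc_def
    -- B's value
    have hB : chooseMostCommon_alt (a :: t) breakTies
        = ((if c = 1 then some k else none), a :: t) := by
      simp only [chooseMostCommon_alt, if_neg (List.cons_ne_nil a t),
        PySem.Dict.foldl_insert_getD_add_one_eq_counter, ← hitems_def, hfold]
      by_cases hc : c = 1 <;> simp [hc]
    rw [hB]
    -- facts about the max
    have hkM : (k, M) ∈ items := List.mem_of_mem_filter (hfilt ▸ List.mem_cons_self ..)
    have hMub : ∀ e ∈ items, e.2 ≤ M := (PySem.List.le_foldl_max_int items (fun e => e.2) 0).2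
    have hlen_filt : (items.filter (fun e => e.2 == M)).length = c := by
      rw [hc_def, List.countP_eq_length_filter]
    -- now A
    by_cases h1 : (PySem.Set.ofList (a :: t)).length = 1
    · -- a single distinct value: S = [a], items = [(a, count)]
      have hr0 : r = [] := by
        rw [hS] at h1; simpa using h1
      have hitems1 : items = [(a, (List.count a (a :: t) : Int))] := by
        rw [hitems, hS, hr0]; rfl
      have hk_a : k = a := by
        rw [hitems1] at hfilt
        have : (k, M) ∈ [(a, (List.count a (a :: t) : Int))] :=
          List.mem_of_mem_filter (hfilt ▸ List.mem_cons_self ..)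
        simp at this
        exact this.1
      have hM1 : M = (List.count a (a :: t) : Int) := by
        rw [hM_def, hitems1]
        simp only [List.foldl_cons, List.foldl_nil]
        exact max_eq_right (Int.natCast_nonneg _)
      have hc1 : c = 1 := by
        rw [hc_def, hitems1, hM1]
        simp
      simp only [chooseMostCommon]
      rw [hS, hr0]
      simp [hc1, hk_a]
    · have h0 : ¬ (PySem.Set.ofList (a :: t)).length = 0 := by
        rw [hS]; simp
      -- A takes the sort-and-filter path
      simp only [chooseMostCommon]
      rw [if_neg (by simpa using h1), if_neg (by simpa using h0)]
      have hitems_ne : items ≠ [] := by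
        rw [hitems, hS]; simp
      -- the sorted counts list and its head
      rcases hsort : PySem.List.sorted items (fun vc => vc.2) true with _ | ⟨h, t'⟩
      · exact absurd ((PySem.List.sorted_eq_nil_iff items _ _).1 hsort) hitems_ne
      have hperm : (h :: t').Perm items := by
        have := PySem.List.sorted_perm items (fun vc => vc.2) true
        rwa [hsort] at this
      have hub : ∀ y ∈ items, y.2 ≤ h.2 :=
        PySem.List.key_head_sorted_rev_ge items (fun vc => vc.2) hsort
      have hh_mem : h ∈ items := hperm.mem_iff.1 (List.mem_cons_self ..)
      have hhM : h.2 = M := le_antisymm (hMub h hh_mem) (hub (k, M) hkM)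
      have hget : PySem.List.pyGet? (h :: t') 0 = some h := by simp [pysem]
      -- the comprehension filters exactly the M-count entries
      have hfc : (h :: t').filter (fun vc => (PySem.List.pyGet? (h :: t') 0).map (·.2) == some vc.2)
          = (h :: t').filter (fun vc => vc.2 == M) := by
        refine List.filter_congr ?_
        intro x _
        rw [hget]
        simp only [Option.map_some]
        rw [hhM]
        by_cases hxM : x.2 = M
        · simp [hxM]
        · simp [hxM, Ne.symm hxM]
      rw [hfc]
      have hlenA : ((h :: t').filter (fun vc => vc.2 == M)).length = c := by
        rw [← List.countP_eq_length_filter, hperm.countP_eq]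
      have hbor : PySem.Int.bor 1 (if breakTies then 1 else 0) = 1 := by
        cases breakTies <;> rfl
      rw [hbor]
      by_cases hc : c = 1
      · -- a unique most common element: it is (k, M) on both sides
        obtain ⟨y, hy⟩ := List.length_eq_one_iff.1 (hlenA.trans hc)
        have hrest : rest = [] := by
          have := hfilt ▸ hlen_filt
          rw [hc] at this
          simpa using this
        have hy_mem : y ∈ items.filter (fun e => e.2 == M) := by
          rw [hfilt, hrest]
          have hy_in : y ∈ (h :: t').filter (fun vc => vc.2 == M) := by
            rw [hy]; simp
          have hyM : (y.2 == M) = true := (List.mem_filter.1 hy_in).2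
          have hy_items : y ∈ items := hperm.mem_iff.1 (List.mem_of_mem_filter hy_in)
          have : y ∈ items.filter (fun e => e.2 == M) := List.mem_filter.2 ⟨hy_items, hyM⟩
          rwa [hfilt, hrest] at this
        have hy_eq : y = (k, M) := by
          rw [hfilt, hrest] at hy_mem
          simpa using hy_mem
        rw [hlenA, hc, hy, hy_eq]
        simp [pysem]
      · have hcond : (((c : Nat) : Int) == 1) = false := by
          simp only [beq_eq_false_iff_ne, ne_eq]
          exact_mod_cast hc
        rw [hlenA, hcond]
        simp [hc]
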